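-- pv_equiv track=rewrite | github.com/kikoralston/RIPS | CE/DemandFuncsCE.py | getPeakDemandPlusCurtailmentDayHours
-- ===== SOURCE A (Python) =====
-- import copy, operator, os, sys
--
-- def getHoursOfDayForGivenHour(inputHour):
--     """Get all hours for day for a given hour of year.
--
--     :param inputHour: single hour (0-8759 basis)
--     :return: hours for entire day (Returns value on 1-8760 basis)
--     """
--     return getHoursOfDayForGivenDay(inputHour // 24)
--
-- def getHoursOfDayForGivenDay(numDay):
--     """Get all hours for day for a given day
--
--     :param numDay: day in 0-364 basis
--     :return: hour in 1-8760 basis.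
--     """
--     hoursPerDay = 24
--     (dayStartHour, dayEndHour) = (numDay * hoursPerDay, (numDay + 1) * hoursPerDay)
--     return [hr + 1 for hr in range(dayStartHour, dayEndHour)]
--
-- def getPeakDemandPlusCurtailmentDayHours(netDemand, totalHrlyCurtailments):
--     """Get hours for entire day for day w/ peak net demand + hourly curtailment
--
--     :param netDemand: net demand dict {gcm: [1d list w/out head]}
--     :param totalHrlyCurtailments: total system curtailment dict {gcm: [1d list w/out head]}
--     :return: dict with 1d list of hours of day (1-8760 basis) for each gcm {gcm: [1d list w/out head]}
--     """
--     (maxPeakDemandAndCurtailment, maxPeakDemandAndCurtailmentDay) = (None, None)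
--     assert (netDemand.keys() == totalHrlyCurtailments.keys())
--
--     out_dict = dict()
--     for g in netDemand:
--         assert (len(netDemand[g]) == len(totalHrlyCurtailments[g]))
--         demandPlusCurtail = list(map(operator.add, netDemand[g], totalHrlyCurtailments[g]))
--
--         out_dict[g] = getHoursOfDayForGivenHour(demandPlusCurtail.index(max(demandPlusCurtail)))
--
--     return out_dict
-- ===== SOURCE B (Python) =====
-- def getPeakDemandPlusCurtailmentDayHours(netDemand, totalHrlyCurtailments):
--     """Hierarchical day-level reduction: since the output only depends on which
--     DAY contains the peak hour, fold the summed series into per-day (24-hour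
--     chunk) maxima, pick the first day whose chunk maximum is the global
--     maximum, and emit that day's hours directly.  Never computes the peak
--     hour's index at all."""
--     assert (netDemand.keys() == totalHrlyCurtailments.keys())
--
--     out_dict = dict()
--     for g, dem in netDemand.items():
--         cur = totalHrlyCurtailments[g]
--         assert (len(dem) == len(cur))
--         sums = [a + b for a, b in zip(dem, cur)]
--         dayMaxes = [max(sums[s:s + 24]) for s in range(0, len(sums), 24)]
--         bestDay = dayMaxes.index(max(dayMaxes))
--         out_dict[g] = [bestDay * 24 + h + 1 for h in range(24)]
--     return out_dict
-- ===== Notes on version B (the rewrite author's own statement) =====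
-- stated objective: alternative
-- what changed: Replaced A's hour-level max-then-index over the combined list by a hierarchical day-level reduction: fold the summed series into per-day 24-hour chunk maxima, take the first day whose chunk maximum equals the global maximum, and emit that day's hours directly, never computing the index of the peak hour.
import Mathlib
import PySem

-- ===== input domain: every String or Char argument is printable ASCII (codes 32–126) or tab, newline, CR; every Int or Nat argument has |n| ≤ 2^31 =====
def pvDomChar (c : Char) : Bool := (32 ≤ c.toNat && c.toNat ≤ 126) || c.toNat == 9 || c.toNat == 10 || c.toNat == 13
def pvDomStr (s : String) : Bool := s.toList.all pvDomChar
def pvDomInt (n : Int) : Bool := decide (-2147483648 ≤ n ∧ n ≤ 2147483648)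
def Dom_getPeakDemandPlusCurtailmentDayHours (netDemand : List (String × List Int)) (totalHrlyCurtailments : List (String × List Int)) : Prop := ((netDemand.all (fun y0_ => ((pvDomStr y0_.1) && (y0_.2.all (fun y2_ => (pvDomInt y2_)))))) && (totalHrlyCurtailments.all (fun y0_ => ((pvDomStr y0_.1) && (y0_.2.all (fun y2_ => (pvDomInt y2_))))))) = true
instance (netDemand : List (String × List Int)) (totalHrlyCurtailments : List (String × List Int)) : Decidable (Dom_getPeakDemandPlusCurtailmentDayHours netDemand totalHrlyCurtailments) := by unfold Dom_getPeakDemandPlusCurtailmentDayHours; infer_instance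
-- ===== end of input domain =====

-- B replaces A's hour-level max-then-index over the combined list by a hierarchical
-- day-level reduction: per-day (24-hour chunk) maxima, first day whose chunk maximum
-- is the global maximum, hours of that day emitted directly; the peak hour's index
-- is never computed.

-- ===== PORT A =====
def getHoursOfDayForGivenDay (numDay : Int) : List Int :=
  (PySem.List.pyRange (numDay * 24) ((numDay + 1) * 24) 1).map (fun hr => hr + 1)

def getHoursOfDayForGivenHour (inputHour : Int) : List Int :=
  getHoursOfDayForGivenDay (PySem.Int.floordiv inputHour 24)

def getPeakDemandPlusCurtailmentDayHours (netDemand : List (String × List Int)) (totalHrlyCurtailments : List (String × List Int)) : List (String × List Int) :=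
  -- for g in netDemand: iterate the dict's keys; lookups are dict lookups
  ((netDemand.map Prod.fst).foldl
    (fun (out : PySem.Dict String (List Int)) g =>
      let demandPlusCurtail :=
        List.zipWith (· + ·) ((PySem.Dict.mk netDemand).getD g [])
          ((PySem.Dict.mk totalHrlyCurtailments).getD g [])
      -- max() raises ValueError and .index a ValueError on an empty list: excluded by Pre_
      let m := (PySem.List.max? demandPlusCurtail (fun x => x)).getD 0
      let idx := (PySem.List.index? demandPlusCurtail m).getD 0
      out.insert g (getHoursOfDayForGivenHour (idx : Int)))
    PySem.Dict.empty).items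

-- ===== PORT B =====
def getPeakDemandPlusCurtailmentDayHours_alt (netDemand : List (String × List Int)) (totalHrlyCurtailments : List (String × List Int)) : List (String × List Int) :=
  (netDemand.foldl
    (fun (out : PySem.Dict String (List Int)) p =>
      let g := p.1
      let dem := p.2
      let cur := (PySem.Dict.mk totalHrlyCurtailments).getD g []
      let sums := List.zipWith (· + ·) dem cur
      -- dayMaxes = [max(sums[s:s+24]) for s in range(0, len(sums), 24)]
      -- (max() over an empty sums yields no chunk; an empty dayMaxes makes max() raise: excluded by Pre_)
      let dayMaxes := (PySem.List.pyRange 0 (sums.length : Int) 24).map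
        (fun s => (PySem.List.max? (PySem.List.slice sums (some s) (some (s + 24))) (fun x => x)).getD 0)
      let bestDay := ((PySem.List.index? dayMaxes
        ((PySem.List.max? dayMaxes (fun x => x)).getD 0)).getD 0 : Int)
      out.insert g ((PySem.List.pyRange 0 24 1).map (fun h => bestDay * 24 + h + 1)))
    PySem.Dict.empty).items

-- ===== PRECONDITION & SPEC =====
-- Pre_ excludes: inputs whose assert fails (key sets differ, or per-key lengths differ)
-- and inputs with an empty per-gcm list (max([]) raises ValueError) — on all of these A
-- raises; and association lists with duplicate keys, which have no unambiguous dict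
-- counterpart (Python's dict keeps the last value, the first-match convention the first).
def Pre_getPeakDemandPlusCurtailmentDayHours (netDemand : List (String × List Int)) (totalHrlyCurtailments : List (String × List Int)) : Prop :=
  (netDemand.map Prod.fst).Nodup ∧ (totalHrlyCurtailments.map Prod.fst).Nodup ∧
  (∀ p ∈ netDemand, p.1 ∈ totalHrlyCurtailments.map Prod.fst) ∧
  (∀ q ∈ totalHrlyCurtailments, q.1 ∈ netDemand.map Prod.fst) ∧
  (∀ p ∈ netDemand, ∀ q ∈ totalHrlyCurtailments, p.1 = q.1 → p.2 ≠ [] ∧ p.2.length = q.2.length)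
instance (netDemand : List (String × List Int)) (totalHrlyCurtailments : List (String × List Int)) : Decidable (Pre_getPeakDemandPlusCurtailmentDayHours netDemand totalHrlyCurtailments) := by unfold Pre_getPeakDemandPlusCurtailmentDayHours; infer_instance

def pvWitness_getPeakDemandPlusCurtailmentDayHours : (List (String × List Int)) × (List (String × List Int)) :=
  ([("a", [1, 5, 2]), ("b", [0, 0])], [("b", [3, 1]), ("a", [0, 0, 7])])

def Spec_getPeakDemandPlusCurtailmentDayHours (netDemand : List (String × List Int)) (totalHrlyCurtailments : List (String × List Int)) (out : List (String × List Int)) : Prop := out = getPeakDemandPlusCurtailmentDayHours_alt netDemand totalHrlyCurtailments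
instance (netDemand : List (String × List Int)) (totalHrlyCurtailments : List (String × List Int)) (out : List (String × List Int)) : Decidable (Spec_getPeakDemandPlusCurtailmentDayHours netDemand totalHrlyCurtailments out) := by unfold Spec_getPeakDemandPlusCurtailmentDayHours; infer_instance

-- ===== CLAIM (what is proved, stated in full; the proofs are below) =====
def Claim_equal_getPeakDemandPlusCurtailmentDayHours : Prop := ∀ (netDemand : List (String × List Int)) (totalHrlyCurtailments : List (String × List Int)), Dom_getPeakDemandPlusCurtailmentDayHours netDemand totalHrlyCurtailments → Pre_getPeakDemandPlusCurtailmentDayHours netDemand totalHrlyCurtailments → Spec_getPeakDemandPlusCurtailmentDayHours netDemand totalHrlyCurtailments (getPeakDemandPlusCurtailmentDayHours netDemand totalHrlyCurtailments)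

-- ===== LEMMAS AND PROOFS =====

-- "m is the maximum of l and i is the first index attaining it"
def pvFirstMax (l : List Int) (m : Int) (i : Nat) : Prop :=
  i < l.length ∧ l.getD i 0 = m ∧ (∀ j, j < i → l.getD j 0 < m) ∧ (∀ j, j < l.length → l.getD j 0 ≤ m)

theorem pvFirstMax_A (l : List Int) (hl : l ≠ []) :
    ∃ (m : Int) (i : Nat), PySem.List.max? l (fun x => x) = some m ∧
      PySem.List.index? l m = some i ∧ pvFirstMax l m i := by
  obtain ⟨m, hm⟩ : ∃ m, PySem.List.max? l (fun x => x) = some m := by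
    cases h : PySem.List.max? l (fun x => x) with
    | none => exact absurd ((PySem.List.max?_eq_none_iff l (fun x => x)).mp h) hl
    | some m => exact ⟨m, rfl⟩
  have hmem : m ∈ l := PySem.List.max?_mem hm
  have hmax : ∀ y ∈ l, y ≤ m := by
    intro y hy; exact PySem.List.max?_isMax hm y hy
  obtain ⟨i, hi⟩ : ∃ i, PySem.List.index? l m = some i := by
    cases h : PySem.List.index? l m with
    | none => exact absurd hmem ((PySem.List.index?_eq_none_iff l m).mp h)
    | some i => exact ⟨i, rfl⟩
  obtain ⟨hik, hget, hpre⟩ := PySem.List.getElem_of_index?_eq_some hi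
  refine ⟨m, i, hm, hi, hik, ?_, ?_, ?_⟩
  · simp [List.getD_eq_getElem?_getD, List.getElem?_eq_getElem hik, hget]
  · intro j hj
    have hjl : j < l.length := lt_trans hj hik
    have hne : l[j] ≠ m := hpre j hj
    have hle : l[j] ≤ m := hmax _ (List.getElem_mem hjl)
    simp only [List.getD_eq_getElem?_getD, List.getElem?_eq_getElem hjl, Option.getD_some]
    exact lt_of_le_of_ne hle hne
  · intro j hj
    simp only [List.getD_eq_getElem?_getD, List.getElem?_eq_getElem hj, Option.getD_some]
    exact hmax _ (List.getElem_mem hj)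

-- the 24-element window starting at 24k: its max exists and is the max of
-- sums over indices [24k, min(24k+24, len))
theorem pvWindowMax (sums : List Int) (k : Nat) (hk : 24 * k < sums.length) :
    ∃ Mk, PySem.List.max? ((sums.drop (24 * k)).take 24) (fun x => x) = some Mk ∧
      (∃ j, 24 * k ≤ j ∧ j < sums.length ∧ j < 24 * k + 24 ∧ sums.getD j 0 = Mk) ∧
      (∀ j, 24 * k ≤ j → j < sums.length → j < 24 * k + 24 → sums.getD j 0 ≤ Mk) := by
  set w := (sums.drop (24 * k)).take 24 with hw
  have hwlen : w.length = min 24 (sums.length - 24 * k) := by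
    simp [hw]
  have hwne : w ≠ [] := by
    intro h
    rw [h] at hwlen
    simp at hwlen
    omega
  have hwget : ∀ (i : Nat) (hi : i < w.length), w[i] = sums[24 * k + i]'(by omega) := by
    intro i hi
    simp only [hw, List.getElem_take, List.getElem_drop]
  obtain ⟨Mk, hMk⟩ : ∃ Mk, PySem.List.max? w (fun x => x) = some Mk := by
    cases h : PySem.List.max? w (fun x => x) with
    | none => exact absurd ((PySem.List.max?_eq_none_iff w (fun x => x)).mp h) hwne
    | some m => exact ⟨m, rfl⟩
  refine ⟨Mk, hMk, ?_, ?_⟩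
  · obtain ⟨i, hi, hieq⟩ := List.getElem_of_mem (PySem.List.max?_mem hMk)
    refine ⟨24 * k + i, by omega, by omega, by omega, ?_⟩
    have : sums[24 * k + i]'(by omega) = Mk := by rw [← hwget i hi, hieq]
    simp [List.getD_eq_getElem?_getD, List.getElem?_eq_getElem (show 24 * k + i < sums.length by omega), this]
  · intro j h1 h2 h3
    have hjw : j - 24 * k < w.length := by omega
    have hmem : sums[j]'h2 ∈ w := by
      rw [List.mem_iff_getElem]
      refine ⟨j - 24 * k, hjw, ?_⟩
      rw [hwget (j - 24 * k) hjw]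
      congr 1
      omega
    have := PySem.List.max?_isMax hMk _ hmem
    simpa [List.getD_eq_getElem?_getD, List.getElem?_eq_getElem h2] using this

-- dict lookup in an association list with distinct keys finds the list's own pair
theorem pvGetD_mk_of_mem {ν : Type} (l : List (String × ν)) (p : String × ν) (d : ν)
    (hnd : (l.map Prod.fst).Nodup) (hp : p ∈ l) :
    (PySem.Dict.mk l).getD p.1 d = p.2 := by
  have hitems : ((p.1, p.2) : String × ν) ∈ (PySem.Dict.mk l).items := by
    show (p.1, p.2) ∈ l
    simpa using hp
  have hkeys : (PySem.Dict.mk l).keys.Nodup := by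
    show (l.map Prod.fst).Nodup
    exact hnd
  exact PySem.Dict.getD_of_mem_items (PySem.Dict.mk l) hitems hkeys d

theorem pvMap_add_one_pyRange (a b : Int) :
    (PySem.List.pyRange a b 1).map (fun hr => hr + 1) = PySem.List.pyRange (a + 1) (b + 1) 1 := by
  rw [PySem.List.pyRange_one a b, PySem.List.pyRange_one (a + 1) (b + 1)]
  have : b + 1 - (a + 1) = b - a := by ring
  rw [this, List.map_map]
  exact List.map_congr_left (fun k _ => by simp; ring)

-- the per-key core: B's day-level reduction lands on the day of A's first peak hour
theorem pvBestDay (sums : List Int) (m : Int) (idx : Nat) (hF : pvFirstMax sums m idx) :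
    ((PySem.List.index?
        ((PySem.List.pyRange 0 (sums.length : Int) 24).map
          (fun s => (PySem.List.max? (PySem.List.slice sums (some s) (some (s + 24))) (fun x => x)).getD 0))
        ((PySem.List.max?
          ((PySem.List.pyRange 0 (sums.length : Int) 24).map
            (fun s => (PySem.List.max? (PySem.List.slice sums (some s) (some (s + 24))) (fun x => x)).getD 0))
          (fun x => x)).getD 0)).getD 0) = idx / 24 := by
  obtain ⟨hidx, hgidx, hlt, hle⟩ := hF
  set n := sums.length with hn
  have hn1 : 1 ≤ n := by omega
  -- shape of the chunk-start range: starts are 24*k for k < D = ceil(n/24)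
  set D : Nat := (n + 23) / 24 with hD
  have hrange : PySem.List.pyRange 0 (n : Int) 24 = (List.range D).map (fun k => ((24 * k : Nat) : Int)) := by
    rw [PySem.List.pyRange_of_pos 0 (n : Int) (by norm_num)]
    have hlt0 : (0 : Int) < (n : Int) := by exact_mod_cast hn1
    rw [if_pos hlt0]
    have hcast : (((n : Int) - 0 + 24 - 1) / 24).toNat = D := by
      have h1 : ((n : Int) - 0 + 24 - 1) / 24 = (((n + 23) / 24 : Nat) : Int) := by
        rw [show ((n : Int) - 0 + 24 - 1) = ((n + 23 : Nat) : Int) by push_cast; ring,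
            show (24 : Int) = ((24 : Nat) : Int) by norm_num, ← Int.natCast_div]
      rw [h1, Int.toNat_natCast]
    rw [hcast]
    exact List.map_congr_left (fun k _ => by push_cast; ring)
  set f : Int → Int := fun s => (PySem.List.max? (PySem.List.slice sums (some s) (some (s + 24))) (fun x => x)).getD 0 with hf
  set dayMaxes := (PySem.List.pyRange 0 (n : Int) 24).map f with hdm
  have hdm' : dayMaxes = (List.range D).map (fun k => f ((24 * k : Nat) : Int)) := by
    rw [hdm, hrange, List.map_map]; rfl
  have hdmlen : dayMaxes.length = D := by rw [hdm']; simp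
  -- f at a chunk start, via the window lemma
  have hfk : ∀ k, k < D → ∃ Mk, f ((24 * k : Nat) : Int) = Mk ∧
      (∃ j, 24 * k ≤ j ∧ j < n ∧ j < 24 * k + 24 ∧ sums.getD j 0 = Mk) ∧
      (∀ j, 24 * k ≤ j → j < n → j < 24 * k + 24 → sums.getD j 0 ≤ Mk) := by
    intro k hk
    obtain ⟨Mk, hmax, hex, hub⟩ := pvWindowMax sums k (by omega)
    refine ⟨Mk, ?_, hex, hub⟩
    rw [hf]
    simp only []
    rw [PySem.List.slice_toNat sums (by positivity) (by positivity)]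
    have e2 : (((24 * k : Nat) : Int) + 24).toNat = 24 * k + 24 := by omega
    have e1 : ((24 * k : Nat) : Int).toNat = 24 * k := by omega
    rw [e2, e1]
    have e3 : ((sums.drop (24 * k)).take (24 * k + 24 - 24 * k)) = (sums.drop (24 * k)).take 24 := by
      congr 1; omega
    rw [e3, hmax]
    rfl
  -- every dayMax is ≤ m
  have hdayle : ∀ k, k < D → f ((24 * k : Nat) : Int) ≤ m := by
    intro k hk
    obtain ⟨Mk, hfeq, ⟨j, hj1, hj2, hj3, hjv⟩, _⟩ := hfk k hk
    rw [hfeq, ← hjv]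
    exact hle j hj2
  set d : Nat := idx / 24 with hd
  have hdD : d < D := by omega
  -- the chunk containing idx has max exactly m
  have hdayd : f ((24 * d : Nat) : Int) = m := by
    obtain ⟨Mk, hfeq, _, hub⟩ := hfk d hdD
    have h1 : Mk ≤ m := by
      have := hdayle d hdD; rwa [hfeq] at this
    have h2 : m ≤ Mk := by
      have := hub idx (by omega) hidx (by omega)
      rwa [hgidx] at this
    rw [hfeq]; omega
  -- chunks before d stay strictly below m
  have hdaylt : ∀ k, k < d → f ((24 * k : Nat) : Int) < m := by
    intro k hk
    obtain ⟨Mk, hfeq, ⟨j, hj1, hj2, hj3, hjv⟩, _⟩ := hfk k (by omega)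
    rw [hfeq, ← hjv]
    exact hlt j (by omega)
  -- indexing dayMaxes
  have hdmget : ∀ k, k < D → dayMaxes[k]? = some (f ((24 * k : Nat) : Int)) := by
    intro k hk
    rw [hdm']
    simp [List.getElem?_range hk]
  -- the global max over dayMaxes is m
  have hmmem : m ∈ dayMaxes := by
    refine List.mem_of_getElem? (i := d) ?_
    rw [hdmget d hdD, hdayd]
  obtain ⟨M, hM⟩ : ∃ M, PySem.List.max? dayMaxes (fun x => x) = some M := by
    cases h : PySem.List.max? dayMaxes (fun x => x) with
    | none =>
      have := (PySem.List.max?_eq_none_iff dayMaxes (fun x => x)).mp h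
      rw [this] at hmmem; simp at hmmem
    | some M => exact ⟨M, rfl⟩
  have hMeq : M = m := by
    have h1 : m ≤ M := PySem.List.max?_isMax hM m hmmem
    have h2 : M ≤ m := by
      obtain ⟨k, hk, hkeq⟩ := List.getElem_of_mem (PySem.List.max?_mem hM)
      have hkD : k < D := by omega
      have h := hdmget k hkD
      rw [List.getElem?_eq_getElem hk, hkeq] at h
      rw [Option.some.injEq] at h
      rw [h]
      exact hdayle k hkD
    omega
  -- the first index attaining m in dayMaxes is d
  obtain ⟨k0, hk0⟩ : ∃ k0, PySem.List.index? dayMaxes m = some k0 := by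
    cases h : PySem.List.index? dayMaxes m with
    | none => exact absurd hmmem ((PySem.List.index?_eq_none_iff dayMaxes m).mp h)
    | some k0 => exact ⟨k0, rfl⟩
  obtain ⟨hk0len, hk0eq, hk0pre⟩ := PySem.List.getElem_of_index?_eq_some hk0
  have hk0d : k0 = d := by
    rcases lt_trichotomy k0 d with hc | hc | hc
    · exfalso
      have h := hdmget k0 (by omega)
      rw [List.getElem?_eq_getElem hk0len, hk0eq] at h
      rw [Option.some.injEq] at h
      exact absurd h.symm (ne_of_lt (hdaylt k0 hc))
    · exact hc
    · exfalso
      have hdlen : d < dayMaxes.length := by omega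
      have h := hdmget d hdD
      rw [List.getElem?_eq_getElem hdlen, hdayd] at h
      rw [Option.some.injEq] at h
      exact hk0pre d hc h
  rw [hM, Option.getD_some, hMeq, hk0, Option.getD_some, hk0d]

theorem getPeakDemandPlusCurtailmentDayHours_eq
    (netDemand totalHrlyCurtailments : List (String × List Int))
    (hpre : Pre_getPeakDemandPlusCurtailmentDayHours netDemand totalHrlyCurtailments) :
    getPeakDemandPlusCurtailmentDayHours netDemand totalHrlyCurtailments
      = getPeakDemandPlusCurtailmentDayHours_alt netDemand totalHrlyCurtailments := by
  obtain ⟨hnd1, hnd2, hsub1, _hsub2, hlen⟩ := hpre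
  unfold getPeakDemandPlusCurtailmentDayHours getPeakDemandPlusCurtailmentDayHours_alt
  rw [List.foldl_map]
  rw [PySem.Dict.items_foldl_insert_fresh netDemand
    (fun (p : String × List Int) => p.1)
    (fun (p : String × List Int) =>
      let demandPlusCurtail :=
        List.zipWith (· + ·) ((PySem.Dict.mk netDemand).getD p.1 [])
          ((PySem.Dict.mk totalHrlyCurtailments).getD p.1 [])
      let m := (PySem.List.max? demandPlusCurtail (fun x => x)).getD 0
      let idx := (PySem.List.index? demandPlusCurtail m).getD 0
      getHoursOfDayForGivenHour (idx : Int))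
    PySem.Dict.empty
    (by intro a _; simp [PySem.Dict.contains, PySem.Dict.empty])
    (by simpa using hnd1)]
  rw [PySem.Dict.items_foldl_insert_fresh netDemand
    (fun (p : String × List Int) => p.1)
    (fun (p : String × List Int) =>
      let dem := p.2
      let cur := (PySem.Dict.mk totalHrlyCurtailments).getD p.1 []
      let sums := List.zipWith (· + ·) dem cur
      let dayMaxes := (PySem.List.pyRange 0 (sums.length : Int) 24).map
        (fun s => (PySem.List.max? (PySem.List.slice sums (some s) (some (s + 24))) (fun x => x)).getD 0)
      let bestDay := ((PySem.List.index? dayMaxes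
        ((PySem.List.max? dayMaxes (fun x => x)).getD 0)).getD 0 : Int)
      (PySem.List.pyRange 0 24 1).map (fun h => bestDay * 24 + h + 1))
    PySem.Dict.empty
    (by intro a _; simp [PySem.Dict.contains, PySem.Dict.empty])
    (by simpa using hnd1)]
  show [] ++ _ = [] ++ _
  simp only [List.nil_append]
  refine List.map_congr_left ?_
  intro p hp
  refine Prod.ext rfl ?_
  -- shared values for this key
  have hdem : (PySem.Dict.mk netDemand).getD p.1 [] = p.2 := pvGetD_mk_of_mem _ p [] hnd1 hp
  obtain ⟨q, hq, hq1⟩ : ∃ q ∈ totalHrlyCurtailments, q.1 = p.1 := by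
    have := hsub1 p hp
    simp only [List.mem_map] at this
    obtain ⟨q, hq, hq1⟩ := this
    exact ⟨q, hq, hq1⟩
  have hcur : (PySem.Dict.mk totalHrlyCurtailments).getD p.1 [] = q.2 := by
    have := pvGetD_mk_of_mem _ q [] hnd2 hq
    rwa [hq1] at this
  obtain ⟨hne, _hl⟩ := hlen p hp q hq hq1.symm
  rw [hdem, hcur]
  set dpc := List.zipWith (· + ·) p.2 q.2 with hdpc
  have hplen : 1 ≤ p.2.length := by
    cases hcase : p.2 with
    | nil => exact absurd hcase hne
    | cons a t => simp
  have hdpcne : dpc ≠ [] := by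
    intro h
    have h1 : dpc.length = 0 := by rw [h]; rfl
    rw [hdpc, List.length_zipWith, ← _hl, Nat.min_self] at h1
    omega
  -- A's side satisfies pvFirstMax
  obtain ⟨mA, iA, hmax, hidx, hFA⟩ := pvFirstMax_A dpc hdpcne
  show getHoursOfDayForGivenHour _ = _
  simp only [hmax, hidx, Option.getD_some]
  have hbest := pvBestDay dpc mA iA hFA
  rw [hbest]
  -- both sides are the hour list of day d = iA / 24
  set d : Nat := iA / 24 with hd
  unfold getHoursOfDayForGivenHour getHoursOfDayForGivenDay
  have hfd : PySem.Int.floordiv (iA : Int) 24 = (d : Int) := by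
    exact_mod_cast PySem.Int.floordiv_natCast iA 24
  rw [hfd, pvMap_add_one_pyRange]
  rw [PySem.List.pyRange_one, PySem.List.pyRange_one 0 24, List.map_map]
  have hlen25 : ((d : Int) + 1) * 24 + 1 - ((d : Int) * 24 + 1) = ((24 : Nat) : Int) := by push_cast; ring
  have hlen24 : (24 : Int) - 0 = ((24 : Nat) : Int) := by norm_num
  rw [hlen25, hlen24, Int.toNat_natCast]
  exact List.map_congr_left (fun k _ => by simp; ring)

-- ===== VERDICT (by name: the statement is the Claim_ definition above) =====
theorem getPeakDemandPlusCurtailmentDayHours_spec : Claim_equal_getPeakDemandPlusCurtailmentDayHours := by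
  intro netDemand totalHrlyCurtailments _hdom hpre
  exact getPeakDemandPlusCurtailmentDayHours_eq netDemand totalHrlyCurtailments hpre
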